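-- pv_equiv track=rewrite | github.com/m-mcgowan/embedded-cpp-compat-check | src/compat_check/site/html.py | _support_level
-- ===== SOURCE A (Python) =====
-- _PASSING = {"supported", "unreported", "macro_only_yes"}
--
-- def _support_level(statuses: list[str]) -> str:
--     if not statuses:
--         return "\u2014"
--     pass_count = sum(1 for s in statuses if s in _PASSING)
--     if pass_count == len(statuses):
--         return "full"
--     if pass_count == 0:
--         return "none"
--     return "partial"
-- ===== SOURCE B (Python) =====
-- _PASSING = {"supported", "unreported", "macro_only_yes"}
--
--
-- def _classify(s):
--     return "full" if s in _PASSING else "none"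
--
--
-- def _merge(level, here):
--     if level == "\u2014":
--         return here
--     if level != here:
--         return "partial"
--     return level
--
--
-- def _support_level(statuses: list[str]) -> str:
--     # Single pass: classify each status to "full"/"none" and combine with a
--     # 3-level lattice merge, starting from the em-dash bottom element.
--     level = "\u2014"
--     for s in statuses:
--         level = _merge(level, _classify(s))
--     return level
-- ===== Notes on version B (the rewrite author's own statement) =====
-- stated objective: alternative
-- what changed: Replaced the count-then-compare scheme (counter compared against len and 0 after the scan) with a single fold that classifies each status to full/none and combines values through a small lattice merge whose bottom element is the em-dash, so no counter, no len comparison and no separate empty-list branch exist.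
import Mathlib
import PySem

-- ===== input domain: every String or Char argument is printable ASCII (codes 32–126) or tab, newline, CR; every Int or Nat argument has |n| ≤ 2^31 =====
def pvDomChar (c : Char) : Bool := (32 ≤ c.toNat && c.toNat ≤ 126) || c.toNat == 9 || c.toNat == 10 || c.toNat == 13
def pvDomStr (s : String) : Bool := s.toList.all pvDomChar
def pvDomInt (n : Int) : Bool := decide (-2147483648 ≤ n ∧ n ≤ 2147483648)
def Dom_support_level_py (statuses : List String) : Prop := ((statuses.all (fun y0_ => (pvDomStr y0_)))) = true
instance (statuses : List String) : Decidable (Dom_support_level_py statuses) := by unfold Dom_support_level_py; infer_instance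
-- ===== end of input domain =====

-- B replaces A's count-then-compare with a single lattice-merge fold (alternative decomposition, same cost).


-- ===== PORT A =====
-- A: counts passing statuses (the generator-sum as a fold) and compares the count with len and 0.
def pvPASSING : PySem.Set String := PySem.Set.ofList ["supported", "unreported", "macro_only_yes"]

def support_level_py (statuses : List String) : String :=
  if statuses = [] then "\u2014"
  else
    let pass_count : Int :=
      statuses.foldl (fun acc s => if pvPASSING.contains s then acc + 1 else acc) 0
    if pass_count = (statuses.length : Int) then "full"
    else if pass_count = 0 then "none"
    else "partial"

-- ===== PORT B =====
-- B: one fold merging per-element classifications through a 3-level lattice with em-dash bottom.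
def pvClassify (s : String) : String :=
  if pvPASSING.contains s then "full" else "none"

def pvMerge (level here : String) : String :=
  if level = "\u2014" then here
  else if level ≠ here then "partial"
  else level

def support_level_py_alt (statuses : List String) : String :=
  statuses.foldl (fun level s => pvMerge level (pvClassify s)) "\u2014"

-- ===== PRECONDITION & SPEC =====
def Spec_support_level_py (statuses : List String) (out : String) : Prop := out = support_level_py_alt statuses
instance (statuses : List String) (out : String) : Decidable (Spec_support_level_py statuses out) := by unfold Spec_support_level_py; infer_instance

-- ===== CLAIM (what is proved, stated in full; the proofs are below) =====
def Claim_equal_support_level_py : Prop := ∀ (statuses : List String), Dom_support_level_py statuses → Spec_support_level_py statuses (support_level_py statuses)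

-- ===== LEMMAS AND PROOFS =====
theorem pv_merge_partial (x : String) : pvMerge "partial" (pvClassify x) = "partial" := by
  unfold pvMerge pvClassify
  by_cases hx : pvPASSING.contains x
  · rw [if_pos hx]; decide
  · rw [if_neg hx]; decide

theorem pv_fold_partial (xs : List String) :
    xs.foldl (fun level s => pvMerge level (pvClassify s)) "partial" = "partial" := by
  induction xs with
  | nil => rfl
  | cons x xs ih => rw [List.foldl_cons, pv_merge_partial, ih]

theorem pv_fold_full (xs : List String) :
    xs.foldl (fun level s => pvMerge level (pvClassify s)) "full"
      = (if xs.all (fun s => pvPASSING.contains s) then "full" else "partial") := by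
  induction xs with
  | nil => rfl
  | cons x xs ih =>
    rw [List.foldl_cons]
    by_cases hx : pvPASSING.contains x
    · have hm : pvMerge "full" (pvClassify x) = "full" := by
        unfold pvMerge pvClassify; rw [if_pos hx]; decide
      rw [hm, ih, List.all_cons, hx, Bool.true_and]
    · have hm : pvMerge "full" (pvClassify x) = "partial" := by
        unfold pvMerge pvClassify; rw [if_neg hx]; decide
      have hx' : pvPASSING.contains x = false := by
        cases h : pvPASSING.contains x <;> simp_all
      rw [hm, pv_fold_partial, List.all_cons, hx', Bool.false_and, if_neg (by simp)]

theorem pv_fold_none (xs : List String) :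
    xs.foldl (fun level s => pvMerge level (pvClassify s)) "none"
      = (if xs.any (fun s => pvPASSING.contains s) then "partial" else "none") := by
  induction xs with
  | nil => rfl
  | cons x xs ih =>
    rw [List.foldl_cons]
    by_cases hx : pvPASSING.contains x
    · have hm : pvMerge "none" (pvClassify x) = "partial" := by
        unfold pvMerge pvClassify; rw [if_pos hx]; decide
      rw [hm, pv_fold_partial, List.any_cons, hx, Bool.true_or, if_pos (by simp)]
    · have hm : pvMerge "none" (pvClassify x) = "none" := by
        unfold pvMerge pvClassify; rw [if_neg hx]; decide
      have hx' : pvPASSING.contains x = false := by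
        cases h : pvPASSING.contains x <;> simp_all
      rw [hm, ih, List.any_cons, hx', Bool.false_or]

theorem pv_foldl_count (statuses : List String) (n : Int) :
    statuses.foldl (fun acc s => if pvPASSING.contains s then acc + 1 else acc) n
      = n + (statuses.countP (fun s => pvPASSING.contains s) : Int) := by
  induction statuses generalizing n with
  | nil => simp
  | cons x xs ih =>
    rw [List.foldl_cons, List.countP_cons, ih]
    split <;> simp_all <;> ring

-- ===== VERDICT (by name: the statement is the Claim_ definition above) =====
theorem support_level_py_spec : Claim_equal_support_level_py := by
  intro statuses _
  unfold Spec_support_level_py support_level_py support_level_py_alt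
  cases statuses with
  | nil => rfl
  | cons x xs =>
    rw [if_neg (by simp)]
    simp only [pv_foldl_count, zero_add]
    rw [List.foldl_cons]
    have hbot : pvMerge "\u2014" (pvClassify x) = pvClassify x := rfl
    rw [hbot]
    have hcle := List.countP_le_length (l := (x :: xs)) (p := fun s => pvPASSING.contains s)
    by_cases hall : (x :: xs).all (fun s => pvPASSING.contains s)
    · -- all pass: A says "full", B says "full"
      have hx : pvPASSING.contains x := by
        have := List.all_eq_true.mp hall x (by simp); simpa using this
      have hallxs : xs.all (fun s => pvPASSING.contains s) = true := by
        rw [List.all_eq_true]; intro a ha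
        exact List.all_eq_true.mp hall a (by simp [ha])
      have hc : (x :: xs).countP (fun s => pvPASSING.contains s) = (x :: xs).length :=
        List.countP_eq_length.mpr (fun a ha => List.all_eq_true.mp hall a ha)
      rw [if_pos (by exact_mod_cast hc)]
      have hcl : pvClassify x = "full" := by unfold pvClassify; rw [if_pos hx]
      rw [hcl, pv_fold_full, hallxs, if_pos rfl]
    · have hcne : (x :: xs).countP (fun s => pvPASSING.contains s) ≠ (x :: xs).length := by
        intro hc
        exact hall (List.all_eq_true.mpr (fun a ha => List.countP_eq_length.mp hc a ha))
      rw [if_neg (by exact_mod_cast hcne)]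
      by_cases hany : (x :: xs).any (fun s => pvPASSING.contains s)
      · -- mixed: A says "partial", B says "partial"
        rcases List.any_eq_true.mp hany with ⟨a, ha, hpa⟩
        have hpos : 0 < (x :: xs).countP (fun s => pvPASSING.contains s) :=
          List.countP_pos_iff.mpr ⟨a, ha, hpa⟩
        rw [if_neg (by exact_mod_cast Nat.pos_iff_ne_zero.mp hpos)]
        by_cases hx : pvPASSING.contains x
        · have hcl : pvClassify x = "full" := by unfold pvClassify; rw [if_pos hx]
          have hallxs : xs.all (fun s => pvPASSING.contains s) = false := by
            cases h : xs.all (fun s => pvPASSING.contains s)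
            · rfl
            · exfalso; apply hall
              rw [List.all_cons, h]; simpa using hx
          rw [hcl, pv_fold_full, hallxs, if_neg (by simp)]
        · have hcl : pvClassify x = "none" := by unfold pvClassify; rw [if_neg hx]
          have hanyxs : xs.any (fun s => pvPASSING.contains s) = true := by
            have hx' : pvPASSING.contains x = false := by
              cases h : pvPASSING.contains x <;> simp_all
            have := hany
            rw [List.any_cons, hx', Bool.false_or] at this
            exact this
          rw [hcl, pv_fold_none, hanyxs, if_pos rfl]
      · -- none pass: A says "none", B says "none"
        have hc0 : (x :: xs).countP (fun s => pvPASSING.contains s) = 0 := by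
          rw [List.countP_eq_zero]
          intro a ha hpa
          exact hany (List.any_eq_true.mpr ⟨a, ha, hpa⟩)
        rw [if_pos (by exact_mod_cast hc0)]
        have hx : ¬ pvPASSING.contains x := fun h =>
          hany (List.any_eq_true.mpr ⟨x, by simp, by simpa using h⟩)
        have hcl : pvClassify x = "none" := by unfold pvClassify; rw [if_neg hx]
        have hanyxs : xs.any (fun s => pvPASSING.contains s) = false := by
          cases h : xs.any (fun s => pvPASSING.contains s)
          · rfl
          · exfalso
            rcases List.any_eq_true.mp h with ⟨a, ha, hpa⟩
            exact hany (List.any_eq_true.mpr ⟨a, by simp [ha], hpa⟩)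
        rw [hcl, pv_fold_none, hanyxs, if_neg (by simp)]
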